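-- pv_equiv track=rewrite | github.com/DragonflyRobotics/Gisor | telemetry/telemetry_data.py | _shared_attributes
-- ===== SOURCE A (Python) =====
-- from typing import Any
--
-- def _shared_attributes(rows: list[dict[str, Any]], excluded_keys: set[str]) -> dict[str, Any]:
--     if not rows:
--         return {}
--
--     shared: dict[str, Any] = {}
--     for key in rows[0]:
--         if key in excluded_keys:
--             continue
--         value = rows[0][key]
--         if all(row.get(key) == value for row in rows[1:]):
--             shared[key] = value
--     return shared
-- ===== SOURCE B (Python) =====
-- def _shared_attributes(rows, excluded_keys):
--     if not rows:
--         return {}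
--     shared = {k: v for k, v in rows[0].items() if k not in excluded_keys}
--     for row in rows[1:]:
--         for key in list(shared):
--             if row.get(key) != shared[key]:
--                 del shared[key]
--     return shared
-- ===== Notes on version B (the rewrite author's own statement) =====
-- stated objective: alternative
-- what changed: Reversed the loop nesting: instead of scanning all later rows once per key of rows[0], B seeds a candidate dict from rows[0] minus excluded keys and makes one pass over the remaining rows, deleting candidates that mismatch, so the candidate set shrinks as it goes.
import Mathlib
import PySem

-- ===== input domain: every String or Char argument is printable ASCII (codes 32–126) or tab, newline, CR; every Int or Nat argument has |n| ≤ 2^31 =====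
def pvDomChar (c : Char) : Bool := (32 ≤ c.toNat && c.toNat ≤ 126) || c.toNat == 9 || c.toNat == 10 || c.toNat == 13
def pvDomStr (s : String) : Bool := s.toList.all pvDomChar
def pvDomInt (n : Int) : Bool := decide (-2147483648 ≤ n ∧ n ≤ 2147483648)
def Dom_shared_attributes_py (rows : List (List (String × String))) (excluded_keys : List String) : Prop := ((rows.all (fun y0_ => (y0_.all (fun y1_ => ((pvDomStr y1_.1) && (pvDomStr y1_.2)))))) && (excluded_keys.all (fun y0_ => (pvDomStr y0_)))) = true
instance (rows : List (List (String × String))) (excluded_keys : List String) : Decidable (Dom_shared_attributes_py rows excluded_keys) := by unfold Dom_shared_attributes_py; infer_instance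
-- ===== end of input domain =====

-- B reverses A's loop nesting: it seeds a candidate dict from rows[0] minus the excluded
-- keys and walks the remaining rows once, deleting any candidate a row contradicts
-- (shrinking candidate set instead of A's per-key rescan of all rows); same cost class.

-- ===== PORT A =====
-- Literal transliteration of _shared_attributes: key-outer loop over rows[0],
-- per key scanning rows[1:] with all(...). '.getD ""' only totalizes rows[0][key],
-- which cannot fail for a key of rows[0].
def shared_attributes_py (rows : List (List (String × String))) (excluded_keys : List String) : List (String × String) :=
  match rows with
  | [] => []
  | r0 :: rest =>
    let d0 : PySem.Dict String String := PySem.Dict.ofList r0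
    (d0.keys.foldl (fun shared key =>
        if key ∈ excluded_keys then shared
        else
          let value := (d0.get? key).getD ""
          if rest.all (fun row => (PySem.Dict.ofList row).get? key == some value)
          then shared.insert key value else shared)
      PySem.Dict.empty).items

-- ===== PORT B =====
-- Transliteration of Source B: candidate dict from rows[0] (dict comprehension), then one
-- pass over rows[1:], inner loop over a snapshot of the candidates' keys, deleting
-- mismatches. The 'none' branch totalizes shared[key], unreachable since key ∈ sh.keys.
def shared_attributes_py_alt (rows : List (List (String × String))) (excluded_keys : List String) : List (String × String) :=
  match rows with
  | [] => []
  | r0 :: rest =>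
    let init : PySem.Dict String String :=
      (PySem.Dict.ofList r0).items.foldl
        (fun d p => if p.1 ∈ excluded_keys then d else d.insert p.1 p.2) PySem.Dict.empty
    (rest.foldl (fun shared row =>
        shared.keys.foldl (fun sh key =>
          match sh.get? key with
          | some v =>
            if (PySem.Dict.ofList row).get? key == some v then sh else sh.erase key
          | none => sh) shared)
      init).items

-- ===== PRECONDITION & SPEC =====
def Spec_shared_attributes_py (rows : List (List (String × String))) (excluded_keys : List String) (out : List (String × String)) : Prop := out = shared_attributes_py_alt rows excluded_keys
instance (rows : List (List (String × String))) (excluded_keys : List String) (out : List (String × String)) : Decidable (Spec_shared_attributes_py rows excluded_keys out) := by unfold Spec_shared_attributes_py; infer_instance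

-- ===== CLAIM (what is proved, stated in full; the proofs are below) =====
def Claim_equal_shared_attributes_py : Prop := ∀ (rows : List (List (String × String))) (excluded_keys : List String), Dom_shared_attributes_py rows excluded_keys → Spec_shared_attributes_py rows excluded_keys (shared_attributes_py rows excluded_keys)

-- ===== LEMMAS AND PROOFS =====

-- two entries of a list with nodup first components and equal keys are equal
theorem pv_eq_of_nodup_fst {l : List (String × String)} (h : (l.map Prod.fst).Nodup)
    {p q : String × String} (hp : p ∈ l) (hq : q ∈ l) (hfst : p.1 = q.1) : p = q :=
  List.inj_on_of_nodup_map h hp hq hfst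

-- a dict whose items are a filter of a nodup-keyed list has nodup keys
theorem pv_nodup_keys_of_filter (L : List (String × String)) (f : String × String → Bool)
    (d : PySem.Dict String String) (hd : d.items = L.filter f)
    (hL : (L.map Prod.fst).Nodup) : d.keys.Nodup := by
  have : d.keys = (L.filter f).map Prod.fst := by
    simp only [PySem.Dict.keys, hd]
  rw [this]
  exact ((List.filter_sublist).map Prod.fst).nodup hL

-- conditional fresh-key insert loop builds the filtered list
theorem pv_fold_insert_filter (c : String × String → Bool) (val : String × String → String)
    (l : List (String × String)) (acc : PySem.Dict String String)
    (hfresh : ∀ p ∈ l, acc.contains p.1 = false) (hnd : (l.map Prod.fst).Nodup) :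
    (l.foldl (fun sh p => if c p then sh.insert p.1 (val p) else sh) acc).items
      = acc.items ++ (l.filter c).map (fun p => (p.1, val p)) := by
  induction l generalizing acc with
  | nil => simp
  | cons p l ih =>
    simp only [List.map_cons, List.nodup_cons] at hnd
    by_cases hc : c p
    · have hf : acc.contains p.1 = false := hfresh p (by simp)
      have hitems := PySem.Dict.items_insert_of_not_contains acc (val p) hf
      have hfresh' : ∀ q ∈ l, (acc.insert p.1 (val p)).contains q.1 = false := by
        intro q hq
        have hne : q.1 ≠ p.1 := fun h => hnd.1 (h ▸ List.mem_map_of_mem hq)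
        rw [PySem.Dict.contains_insert]
        simp [hne, hfresh q (by simp [hq])]
      simp only [List.foldl_cons, hc, if_pos, List.filter_cons_of_pos hc]
      rw [ih _ hfresh' hnd.2, hitems]
      simp
    · simp only [List.foldl_cons, hc, if_neg, Bool.false_eq_true, not_false_eq_true,
        List.filter_cons_of_neg (by simpa using hc)]
      exact ih _ (fun q hq => hfresh q (by simp [hq])) hnd.2

-- one row's pruning pass over a snapshot of the keys = filtering the items by that row
theorem pv_inner_aux (row : List (String × String)) (sh : PySem.Dict String String)
    (hsh : sh.keys.Nodup) (ks : List String) (hks : ks.Nodup)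
    (acc : PySem.Dict String String)
    (hacc : acc.items = sh.items.filter
      (fun p => decide (p.1 ∈ ks) || ((PySem.Dict.ofList row).get? p.1 == some p.2))) :
    (ks.foldl (fun sh' key =>
        match sh'.get? key with
        | some v =>
          if (PySem.Dict.ofList row).get? key == some v then sh' else sh'.erase key
        | none => sh') acc).items
      = sh.items.filter (fun p => (PySem.Dict.ofList row).get? p.1 == some p.2) := by
  have hshnd : (sh.items.map Prod.fst).Nodup := hsh
  induction ks generalizing acc with
  | nil => simpa using hacc
  | cons k ks ih =>
    simp only [List.nodup_cons] at hks
    have haccnd : acc.keys.Nodup := pv_nodup_keys_of_filter _ _ _ hacc hshnd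
    simp only [List.foldl_cons]
    rcases hm : acc.get? k with _ | v
    · -- key absent: k is not a key of sh at all
      have hknot : ∀ p ∈ sh.items, p.1 ≠ k := by
        intro p hp hpk
        have hmem : p ∈ acc.items := by
          rw [hacc]
          refine List.mem_filter.2 ⟨hp, ?_⟩
          simp [hpk]
        have : acc.get? p.1 = some p.2 := PySem.Dict.get?_of_mem_items _
          (by simpa using hmem) haccnd
        rw [hpk, hm] at this; simp at this
      refine ih hks.2 acc ?_
      rw [hacc]
      exact List.filter_congr (fun p hp => by simp [hknot p hp])
    · have hmemacc : (k, v) ∈ acc.items :=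
        (PySem.Dict.get?_eq_some_iff_mem_items acc k v haccnd).1 hm
      have hmemsh : (k, v) ∈ sh.items := (List.mem_filter.1 (hacc ▸ hmemacc)).1
      by_cases hchk : ((PySem.Dict.ofList row).get? k == some v) = true
      · simp only [hchk, if_pos]
        refine ih hks.2 acc ?_
        rw [hacc]
        refine List.filter_congr (fun p hp => ?_)
        by_cases hpk : p.1 = k
        · have : p = (k, v) := pv_eq_of_nodup_fst hshnd hp hmemsh hpk
          simp [this, hchk]
        · simp [hpk]
      · simp only [hchk, if_neg, Bool.false_eq_true, not_false_eq_true]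
        refine ih hks.2 (acc.erase k) ?_
        have : (acc.erase k).items = acc.items.filter (fun p => !(p.1 == k)) := rfl
        rw [this, hacc, List.filter_filter]
        refine List.filter_congr (fun p hp => ?_)
        by_cases hpk : p.1 = k
        · have hpe : p = (k, v) := pv_eq_of_nodup_fst hshnd hp hmemsh hpk
          simp [hpe, hks.1, hchk]
        · simp [hpk]

theorem pv_inner (row : List (String × String)) (sh : PySem.Dict String String)
    (hsh : sh.keys.Nodup) :
    (sh.keys.foldl (fun sh' key =>
        match sh'.get? key with
        | some v =>
          if (PySem.Dict.ofList row).get? key == some v then sh' else sh'.erase key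
        | none => sh') sh).items
      = sh.items.filter (fun p => (PySem.Dict.ofList row).get? p.1 == some p.2) := by
  refine pv_inner_aux row sh hsh sh.keys hsh sh ?_
  symm
  refine List.filter_eq_self.2 (fun p hp => ?_)
  have : p.1 ∈ sh.keys := List.mem_map_of_mem hp
  simp [this]

-- the outer pass over the remaining rows conjoins one filter per row
theorem pv_outer (d0items : List (String × String)) (hnd : (d0items.map Prod.fst).Nodup)
    (rest : List (List (String × String))) (f : String × String → Bool)
    (acc : PySem.Dict String String) (hacc : acc.items = d0items.filter f) :
    (rest.foldl (fun shared row =>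
        shared.keys.foldl (fun sh key =>
          match sh.get? key with
          | some v =>
            if (PySem.Dict.ofList row).get? key == some v then sh else sh.erase key
          | none => sh) shared) acc).items
      = d0items.filter
          (fun p => f p && rest.all (fun row => (PySem.Dict.ofList row).get? p.1 == some p.2)) := by
  induction rest generalizing f acc with
  | nil => simpa using hacc
  | cons row rest ih =>
    simp only [List.foldl_cons]
    have haccnd : acc.keys.Nodup := pv_nodup_keys_of_filter _ _ _ hacc hnd
    have hstep := pv_inner row acc haccnd
    rw [hacc, List.filter_filter] at hstep
    rw [ih (fun p => ((PySem.Dict.ofList row).get? p.1 == some p.2) && f p) _ hstep]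
    refine List.filter_congr (fun p hp => ?_)
    cases hfp : f p <;> cases hrow : ((PySem.Dict.ofList row).get? p.1 == some p.2) <;> simp [hrow]

-- ===== VERDICT (by name: the statement is the Claim_ definition above) =====
theorem shared_attributes_py_spec : Claim_equal_shared_attributes_py := by
  intro rows excluded_keys _
  unfold Spec_shared_attributes_py shared_attributes_py shared_attributes_py_alt
  match rows with
  | [] => rfl
  | r0 :: rest =>
    simp only
    set d0 : PySem.Dict String String := PySem.Dict.ofList r0 with hd0
    have hnd : (d0.items.map Prod.fst).Nodup := PySem.Dict.nodup_keys_ofList r0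
    have hget : ∀ p ∈ d0.items, d0.get? p.1 = some p.2 := by
      intro p hp
      exact PySem.Dict.get?_of_mem_items _ (by simpa using hp) hnd
    -- A's side: fold over keys = fold over items, then the fresh-insert lemma
    have hkeys : d0.keys = d0.items.map Prod.fst := rfl
    rw [hkeys, List.foldl_map]
    have hAstep :
        (fun (sh : PySem.Dict String String) (p : String × String) =>
          if p.1 ∈ excluded_keys then sh
          else
            let value := (d0.get? p.1).getD ""
            if rest.all (fun row => (PySem.Dict.ofList row).get? p.1 == some value)
            then sh.insert p.1 value else sh)
        = (fun sh p =>
            if (!decide (p.1 ∈ excluded_keys)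
                && rest.all (fun row =>
                  (PySem.Dict.ofList row).get? p.1 == some ((d0.get? p.1).getD "")))
            then sh.insert p.1 ((d0.get? p.1).getD "") else sh) := by
      funext sh p
      by_cases h : p.1 ∈ excluded_keys <;>
        simp only [h, decide_true, decide_false, Bool.not_true, Bool.not_false,
          Bool.false_and, Bool.true_and, if_true, if_false, Bool.false_eq_true]
    rw [hAstep, pv_fold_insert_filter _ _ _ _ (fun p _ => PySem.Dict.contains_empty p.1) hnd]
    -- B's side: seed filter, then the outer pruning lemma
    have hBinit := pv_fold_insert_filter (fun p => !decide (p.1 ∈ excluded_keys)) Prod.snd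
      d0.items PySem.Dict.empty (fun p _ => PySem.Dict.contains_empty p.1) hnd
    have hBstep :
        (fun (d : PySem.Dict String String) (p : String × String) =>
          if p.1 ∈ excluded_keys then d else d.insert p.1 p.2)
        = (fun d p => if (!decide (p.1 ∈ excluded_keys)) then d.insert p.1 p.2 else d) := by
      funext d p
      by_cases h : p.1 ∈ excluded_keys <;> simp [h]
    have hinit : (d0.items.foldl
        (fun (d : PySem.Dict String String) p =>
          if (!decide (p.1 ∈ excluded_keys)) then d.insert p.1 p.2 else d)
        PySem.Dict.empty).items
        = d0.items.filter (fun p => !decide (p.1 ∈ excluded_keys)) := by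
      rw [hBinit]; simp [PySem.Dict.empty]
    rw [hBstep,
      pv_outer d0.items hnd rest (fun p => !decide (p.1 ∈ excluded_keys)) _ hinit]
    -- both are filters of d0.items; the predicates agree on its members
    simp only [PySem.Dict.empty, List.nil_append]
    rw [List.map_congr_left (l := d0.items.filter _) (g := id)
      (fun p hp => by rw [hget p (List.mem_of_mem_filter hp)]; rfl), List.map_id]
    refine List.filter_congr (fun p hp => ?_)
    rw [hget p hp]
    rfl
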